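-- pv_equiv track=rewrite | github.com/xlhdh/classycn | crf.py | x_seq_to_features_vector
-- ===== SOURCE A (Python) =====
-- def x_seq_to_features_vector(x, dict, charstop):
--     if charstop: findex = [-1,0,1,2]
--     else: findex = [-2,-1,0,1]
--
--     xf = []
--     for i in range(len(x)):
--         mydict = {}
--         for j in findex:
--             if i+j>(-1) and i+j<len(x):
--                 try:
--                     mydict["gv"+str(j)]=dict[x[i+j]]
--                 except KeyError:
--                     pass
--         xf.append(mydict)
--     return xf
-- ===== SOURCE B (Python) =====
-- def x_seq_to_features_vector(x, dict, charstop):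
--     if charstop: findex = [-1,0,1,2]
--     else: findex = [-2,-1,0,1]
--
--     xf = [{} for _ in range(len(x))]
--     for s in range(len(x)):
--         try:
--             val = dict[x[s]]
--         except KeyError:
--             continue
--         for j in findex:
--             i = s - j
--             if 0 <= i < len(x):
--                 xf[i]["gv"+str(j)] = val
--     return xf
-- ===== Notes on version B (the rewrite author's own statement) =====
-- stated objective: faster
-- what changed: A gathers: for each position i it looks up all four neighboring characters (4n dict lookups, each a try/except); B scatters: it looks up each character exactly once and writes its value into every position whose window covers it, moving the lookup and the exception handling from the inner loop to the outer loop (n lookups).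
import Mathlib
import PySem

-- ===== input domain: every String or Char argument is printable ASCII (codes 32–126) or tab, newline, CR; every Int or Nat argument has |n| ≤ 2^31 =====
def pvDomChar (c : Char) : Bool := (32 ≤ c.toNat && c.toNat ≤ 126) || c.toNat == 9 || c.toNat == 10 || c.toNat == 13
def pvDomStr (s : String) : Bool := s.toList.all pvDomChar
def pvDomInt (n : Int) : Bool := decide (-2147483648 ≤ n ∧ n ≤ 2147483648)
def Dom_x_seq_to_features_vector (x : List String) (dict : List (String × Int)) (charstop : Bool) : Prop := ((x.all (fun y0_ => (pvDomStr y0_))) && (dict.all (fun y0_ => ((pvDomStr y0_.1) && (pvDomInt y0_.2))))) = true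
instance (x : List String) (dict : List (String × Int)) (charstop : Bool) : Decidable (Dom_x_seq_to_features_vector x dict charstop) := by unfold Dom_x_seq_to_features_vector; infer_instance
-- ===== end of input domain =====

-- B scatters instead of gathering: one dict lookup per character (instead of four per
-- position), writing the value into every position whose window covers that character;
-- objective: alternative decomposition, same O(n) cost.

-- ===== PORT A =====
-- the 'findex' assignment shared by both versions
def pvFindex (charstop : Bool) : List Int :=
  if charstop then [-1, 0, 1, 2] else [-2, -1, 0, 1]

-- body of A's inner 'for j in findex' loop; the try/except KeyError is the match on get?
def gvstep (x : List String) (dict : List (String × Int)) (t i : Int)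
    (d : PySem.Dict String Int) (j : Int) : PySem.Dict String Int :=
  if i + j > -1 ∧ i + j < t then
    match PySem.Dict.get? (PySem.Dict.ofList dict) (PySem.List.pyGetD x (i + j) "") with
    | some v => d.insert ("gv" ++ PySem.Int.toStr j) v
    | none => d
  else d

def x_seq_to_features_vector (x : List String) (dict : List (String × Int)) (charstop : Bool) :
    List (List (String × Int)) :=
  let findex := pvFindex charstop
  (PySem.List.pyRange 0 (x.length : Int) 1).foldl
    (fun xf i => xf ++ [(findex.foldl (gvstep x dict (x.length : Int) i) PySem.Dict.empty).items])
    []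

-- ===== PORT B =====
-- body of B's inner 'for j in findex' loop: scatter x[s]'s value into position i = s - j
def scstep (n val s : Int) (xf : List (PySem.Dict String Int)) (j : Int) :
    List (PySem.Dict String Int) :=
  let i := s - j
  if 0 ≤ i ∧ i < n then
    xf.set i.toNat
      ((PySem.List.pyGetD xf i PySem.Dict.empty).insert ("gv" ++ PySem.Int.toStr j) val)
  else xf

-- body of B's outer 'for s in range(len(x))' loop; 'except KeyError: continue' = the none arm
def bstep (x : List String) (dict : List (String × Int)) (findex : List Int)
    (xf : List (PySem.Dict String Int)) (s : Int) : List (PySem.Dict String Int) :=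
  match PySem.Dict.get? (PySem.Dict.ofList dict) (PySem.List.pyGetD x s "") with
  | none => xf
  | some val => findex.foldl (scstep (x.length : Int) val s) xf

def x_seq_to_features_vector_alt (x : List String) (dict : List (String × Int)) (charstop : Bool) :
    List (List (String × Int)) :=
  let findex := pvFindex charstop
  ((PySem.List.pyRange 0 (x.length : Int) 1).foldl (bstep x dict findex)
    (List.replicate x.length PySem.Dict.empty)).map PySem.Dict.items

-- ===== PRECONDITION & SPEC =====
def Spec_x_seq_to_features_vector (x : List String) (dict : List (String × Int)) (charstop : Bool) (out : List (List (String × Int))) : Prop := out = x_seq_to_features_vector_alt x dict charstop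
instance (x : List String) (dict : List (String × Int)) (charstop : Bool) (out : List (List (String × Int))) : Decidable (Spec_x_seq_to_features_vector x dict charstop out) := by unfold Spec_x_seq_to_features_vector; infer_instance

-- ===== CLAIM (what is proved, stated in full; the proofs are below) =====
def Claim_equal_x_seq_to_features_vector : Prop := ∀ (x : List String) (dict : List (String × Int)) (charstop : Bool), Dom_x_seq_to_features_vector x dict charstop → Spec_x_seq_to_features_vector x dict charstop (x_seq_to_features_vector x dict charstop)

-- ===== LEMMAS AND PROOFS =====

-- gd x dict fi t i: the dict A builds at position i, with the window bound generalized to t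
def gd (x : List String) (dict : List (String × Int)) (fi : List Int) (t i : Int) :
    PySem.Dict String Int :=
  fi.foldl (gvstep x dict t i) PySem.Dict.empty

theorem gvstep_no {x : List String} {dict : List (String × Int)} {t i j : Int}
    (d : PySem.Dict String Int) (h : ¬(i + j > -1 ∧ i + j < t)) :
    gvstep x dict t i d j = d := by
  unfold gvstep; rw [if_neg h]

theorem gvstep_yes {x : List String} {dict : List (String × Int)} {t i j : Int} {v : Int}
    (d : PySem.Dict String Int) (h1 : i + j > -1) (h2 : i + j < t)
    (h3 : PySem.Dict.get? (PySem.Dict.ofList dict) (PySem.List.pyGetD x (i + j) "") = some v) :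
    gvstep x dict t i d j = d.insert ("gv" ++ PySem.Int.toStr j) v := by
  unfold gvstep; rw [if_pos ⟨h1, h2⟩, h3]

theorem gvstep_bump {x : List String} {dict : List (String × Int)} {t i j : Int}
    (d : PySem.Dict String Int)
    (h : i + j = t → PySem.Dict.get? (PySem.Dict.ofList dict) (PySem.List.pyGetD x t "") = none) :
    gvstep x dict (t + 1) i d j = gvstep x dict t i d j := by
  by_cases hj : i + j = t
  · unfold gvstep
    rw [hj, h hj]
    have hne : ¬(t > -1 ∧ t < t) := by omega
    by_cases hp : t > -1 ∧ t < t + 1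
    · rw [if_pos hp, if_neg hne]
    · rw [if_neg hp, if_neg hne]
  · unfold gvstep
    exact if_congr (by omega) rfl rfl

theorem gd_bump {x : List String} {dict : List (String × Int)} {fi : List Int} {t i : Int}
    (h : ∀ j ∈ fi, i + j = t →
      PySem.Dict.get? (PySem.Dict.ofList dict) (PySem.List.pyGetD x t "") = none) :
    gd x dict fi (t + 1) i = gd x dict fi t i := by
  unfold gd
  exact PySem.List.foldl_congr_mem fi _ _ _ (fun d j hj => gvstep_bump d (h j hj))

theorem gd_zero (x : List String) (dict : List (String × Int)) (fi : List Int) (i : Int) :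
    gd x dict fi 0 i = PySem.Dict.empty := by
  unfold gd
  induction fi with
  | nil => rfl
  | cons j fi ih => rw [List.foldl_cons, gvstep_no _ (by omega)]; exact ih

theorem gd_hit (x : List String) (dict : List (String × Int)) (a t i val : Int)
    (h0 : 0 ≤ t)
    (hl : PySem.Dict.get? (PySem.Dict.ofList dict) (PySem.List.pyGetD x t "") = some val)
    (hk : a ≤ t - i) (hk3 : t - i ≤ a + 3) :
    gd x dict [a, a + 1, a + 2, a + 3] (t + 1) i
      = (gd x dict [a, a + 1, a + 2, a + 3] t i).insert ("gv" ++ PySem.Int.toStr (t - i)) val := by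
  have hvac : ∀ j : Int, i + j ≠ t → (i + j = t →
      PySem.Dict.get? (PySem.Dict.ofList dict) (PySem.List.pyGetD x t "") = none) :=
    fun j hne he => absurd he hne
  have hcase : t - i = a ∨ t - i = a + 1 ∨ t - i = a + 2 ∨ t - i = a + 3 := by omega
  unfold gd
  simp only [List.foldl_cons, List.foldl_nil]
  rcases hcase with hc | hc | hc | hc
  · have hla : PySem.Dict.get? (PySem.Dict.ofList dict) (PySem.List.pyGetD x (i + a) "") = some val := by
      rw [show i + a = t by omega]; exact hl
    conv_lhs => rw [gvstep_yes (j := a) _ (by omega) (by omega) hla,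
      gvstep_no (t := t + 1) (j := a + 1) _ (by omega),
      gvstep_no (t := t + 1) (j := a + 2) _ (by omega),
      gvstep_no (t := t + 1) (j := a + 3) _ (by omega)]
    conv_rhs => rw [gvstep_no (t := t) (j := a) _ (by omega),
      gvstep_no (t := t) (j := a + 1) _ (by omega),
      gvstep_no (t := t) (j := a + 2) _ (by omega),
      gvstep_no (t := t) (j := a + 3) _ (by omega)]
    rw [show t - i = a by omega]
  · have hla : PySem.Dict.get? (PySem.Dict.ofList dict) (PySem.List.pyGetD x (i + (a + 1)) "") = some val := by
      rw [show i + (a + 1) = t by omega]; exact hl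
    conv_lhs => rw [gvstep_bump (j := a) _ (hvac a (by omega)),
      gvstep_yes (t := t + 1) (j := a + 1) _ (by omega) (by omega) hla,
      gvstep_no (t := t + 1) (j := a + 2) _ (by omega),
      gvstep_no (t := t + 1) (j := a + 3) _ (by omega)]
    conv_rhs => rw [gvstep_no (t := t) (j := a + 1) _ (by omega),
      gvstep_no (t := t) (j := a + 2) _ (by omega),
      gvstep_no (t := t) (j := a + 3) _ (by omega)]
    rw [show t - i = a + 1 by omega]
  · have hla : PySem.Dict.get? (PySem.Dict.ofList dict) (PySem.List.pyGetD x (i + (a + 2)) "") = some val := by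
      rw [show i + (a + 2) = t by omega]; exact hl
    conv_lhs => rw [gvstep_bump (j := a) _ (hvac a (by omega)),
      gvstep_bump (j := a + 1) _ (hvac (a + 1) (by omega)),
      gvstep_yes (t := t + 1) (j := a + 2) _ (by omega) (by omega) hla,
      gvstep_no (t := t + 1) (j := a + 3) _ (by omega)]
    conv_rhs => rw [gvstep_no (t := t) (j := a + 2) _ (by omega),
      gvstep_no (t := t) (j := a + 3) _ (by omega)]
    rw [show t - i = a + 2 by omega]
  · have hla : PySem.Dict.get? (PySem.Dict.ofList dict) (PySem.List.pyGetD x (i + (a + 3)) "") = some val := by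
      rw [show i + (a + 3) = t by omega]; exact hl
    conv_lhs => rw [gvstep_bump (j := a) _ (hvac a (by omega)),
      gvstep_bump (j := a + 1) _ (hvac (a + 1) (by omega)),
      gvstep_bump (j := a + 2) _ (hvac (a + 2) (by omega)),
      gvstep_yes (t := t + 1) (j := a + 3) _ (by omega) (by omega) hla]
    conv_rhs => rw [gvstep_no (t := t) (j := a + 3) _ (by omega)]
    rw [show t - i = a + 3 by omega]

-- one scatter step on a list presented as a map over range n: a pointwise conditional update
theorem sc_map (n : ℕ) (val t j : Int) (f : ℕ → PySem.Dict String Int) :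
    scstep (n : Int) val t ((List.range n).map f) j
      = (List.range n).map (fun i : ℕ =>
          if (i : Int) = t - j then (f i).insert ("gv" ++ PySem.Int.toStr j) val else f i) := by
  unfold scstep
  by_cases h : 0 ≤ t - j ∧ t - j < (n : Int)
  · rw [if_pos h]
    have hm : (t - j).toNat < n := by omega
    have hget : PySem.List.pyGetD ((List.range n).map f) (t - j) PySem.Dict.empty
        = f (t - j).toNat := by
      rw [PySem.List.pyGetD_eq_getElem _ _ h.1 (by simpa using h.2)]
      simp
    rw [hget]
    apply List.ext_getElem
    · simp
    · intro i h1 h2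
      simp only [List.getElem_set, List.getElem_map, List.getElem_range]
      have hi : i < n := by simpa using h2
      by_cases hij : (t - j).toNat = i
      · rw [if_pos hij, if_pos (by omega), hij]
      · rw [if_neg hij, if_neg (by omega)]
  · rw [if_neg h]
    refine (List.map_congr_left fun i hi => ?_).symm
    have : i < n := List.mem_range.mp hi
    rw [if_neg (by omega)]

-- the scatter invariant: after the first t outer iterations every position i holds gd t i
theorem inv_scatter (x : List String) (dict : List (String × Int)) (a : Int) (fi : List Int)
    (hfi : fi = [a, a + 1, a + 2, a + 3]) :
    ∀ t : ℕ, t ≤ x.length →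
      (PySem.List.pyRange 0 (t : Int) 1).foldl (bstep x dict fi)
          (List.replicate x.length PySem.Dict.empty)
        = (List.range x.length).map (fun k : ℕ => gd x dict fi (t : Int) (k : Int)) := by
  intro t
  induction t with
  | zero =>
    intro _
    rw [PySem.List.pyRange_one_eq_nil (by omega)]
    simp only [List.foldl_nil]
    apply List.ext_getElem
    · simp
    · intro i h1 h2
      simp only [List.getElem_replicate, List.getElem_map, List.getElem_range, Nat.cast_zero]
      exact (gd_zero x dict fi i).symm
  | succ t ih =>
    intro h
    have ht : t < x.length := by omega
    rw [show ((t + 1 : ℕ) : Int) = (t : Int) + 1 by push_cast; ring,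
        PySem.List.pyRange_one_succ_right (by omega), List.foldl_append, ih (by omega)]
    simp only [List.foldl_cons, List.foldl_nil]
    unfold bstep
    cases hlk : PySem.Dict.get? (PySem.Dict.ofList dict) (PySem.List.pyGetD x (t : Int) "") with
    | none =>
      refine List.map_congr_left fun k _ => ?_
      exact (gd_bump fun j _ hjt => hlk).symm
    | some val =>
      subst hfi
      simp only [List.foldl_cons, List.foldl_nil]
      rw [sc_map, sc_map, sc_map, sc_map]
      refine List.map_congr_left fun k hk => ?_
      have hkn : k < x.length := List.mem_range.mp hk
      by_cases hhit : a ≤ (t : Int) - k ∧ (t : Int) - k ≤ a + 3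
      · rw [gd_hit x dict a t k val (by omega) hlk hhit.1 hhit.2]
        have hcase : (t : Int) - k = a ∨ (t : Int) - k = a + 1 ∨ (t : Int) - k = a + 2 ∨
            (t : Int) - k = a + 3 := by omega
        rcases hcase with hc | hc | hc | hc
        · rw [if_neg (by omega), if_neg (by omega), if_neg (by omega), if_pos (by omega),
              show (t : Int) - k = a by omega]
        · rw [if_neg (by omega), if_neg (by omega), if_pos (by omega), if_neg (by omega),
              show (t : Int) - k = a + 1 by omega]
        · rw [if_neg (by omega), if_pos (by omega), if_neg (by omega), if_neg (by omega),
              show (t : Int) - k = a + 2 by omega]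
        · rw [if_pos (by omega), if_neg (by omega), if_neg (by omega), if_neg (by omega),
              show (t : Int) - k = a + 3 by omega]
      · rw [if_neg (by omega), if_neg (by omega), if_neg (by omega), if_neg (by omega)]
        refine (gd_bump fun j hj hjt => ?_).symm
        exfalso
        simp only [List.mem_cons, List.not_mem_nil, or_false] at hj
        rcases hj with rfl | rfl | rfl | rfl <;> omega

theorem A_eq (x : List String) (dict : List (String × Int)) (charstop : Bool) :
    x_seq_to_features_vector x dict charstop
      = (List.range x.length).map
          (fun k : ℕ => (gd x dict (pvFindex charstop) (x.length : Int) (k : Int)).items) := by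
  unfold x_seq_to_features_vector gd
  rw [PySem.List.pyRange_zero_natCast]
  simp only [PySem.List.foldl_append_singleton_eq_map, List.nil_append, List.map_map]
  simp [Function.comp_def]

-- ===== VERDICT (by name: the statement is the Claim_ definition above) =====
theorem x_seq_to_features_vector_spec : Claim_equal_x_seq_to_features_vector := by
  intro x dict charstop _
  have hfi : ∃ a : Int, pvFindex charstop = [a, a + 1, a + 2, a + 3] := by
    cases charstop
    · exact ⟨-2, by norm_num [pvFindex]⟩
    · exact ⟨-1, by norm_num [pvFindex]⟩
  obtain ⟨a, ha⟩ := hfi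
  unfold Spec_x_seq_to_features_vector
  rw [A_eq]
  show List.map (fun k : ℕ => (gd x dict (pvFindex charstop) (x.length : Int) (k : Int)).items)
      (List.range x.length)
    = ((PySem.List.pyRange 0 (x.length : Int) 1).foldl (bstep x dict (pvFindex charstop))
        (List.replicate x.length PySem.Dict.empty)).map PySem.Dict.items
  rw [inv_scatter x dict a _ ha x.length le_rfl, List.map_map]
  rfl
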